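-- pv_equiv track=rewrite | github.com/fareedqk/ai-career-mentor | ui/job_tab.py | parse_job_listings
-- ===== SOURCE A (Python) =====
-- def parse_job_listings(result):
--     job_listings = []
--     current_job = {}
--     for line in result.split('\n'):
--         line = line.strip()
--         if line.startswith('Job'):
--             if current_job:
--                 job_listings.append(current_job)
--             current_job = {}
--         elif ':' in line:
--             key, value = line.split(':', 1)
--             current_job[key.strip()] = value.strip()
--     if current_job:
--         job_listings.append(current_job)
--     return job_listings
-- ===== SOURCE B (Python) =====
-- def parse_job_listings(result):
--     lines = [raw.strip() for raw in result.split('\n')]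
--     jobs = []
--     while True:
--         k = 0
--         while k < len(lines) and not lines[k].startswith('Job'):
--             k += 1
--         d = _block(lines[:k])
--         if d:
--             jobs.append(d)
--         if k == len(lines):
--             return jobs
--         lines = lines[k + 1:]
--
-- def _block(lines):
--     pairs = (line.split(':', 1) for line in lines if ':' in line)
--     return {k.strip(): v.strip() for k, v in pairs}
-- ===== Notes on version B (the rewrite author's own statement) =====
-- stated objective: alternative
-- what changed: Replaced A's single-pass state machine (one fold carrying a current dict, flushing on headers) with a strip-all-lines pass followed by a scan loop that repeatedly counts forward to the next header line, parses that slice into a dict via a generator + dict comprehension, and advances past the header.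
import Mathlib
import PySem

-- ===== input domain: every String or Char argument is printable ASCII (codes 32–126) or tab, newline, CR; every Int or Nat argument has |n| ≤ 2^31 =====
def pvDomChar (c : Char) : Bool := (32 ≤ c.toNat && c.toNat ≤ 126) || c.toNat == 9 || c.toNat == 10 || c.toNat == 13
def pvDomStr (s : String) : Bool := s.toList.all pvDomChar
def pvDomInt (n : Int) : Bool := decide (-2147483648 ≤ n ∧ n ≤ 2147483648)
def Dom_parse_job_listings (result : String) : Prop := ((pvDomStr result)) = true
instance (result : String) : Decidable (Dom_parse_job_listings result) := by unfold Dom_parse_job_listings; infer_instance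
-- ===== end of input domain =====

-- B replaces A's inline state machine by: strip all lines first, then repeatedly take the slice
-- up to the next 'Job' header, parse that slice with a filter/comprehension, and skip the header.
-- Objective: alternative (same result, different decomposition; not claimed faster).

-- ===== PORT A =====
-- one loop iteration of A: strip the line, flush on a 'Job' header, else parse a ':' line into the current dict
def paStep (st : List (PySem.Dict String String) × PySem.Dict String String) (raw : String) :
    List (PySem.Dict String String) × PySem.Dict String String :=
  let line := PySem.Str.strip raw
  if PySem.Str.startswith line "Job" then
    (if st.2.items.isEmpty then st.1 else st.1 ++ [st.2], PySem.Dict.empty)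
  else if PySem.Str.isIn ":" line then
    match (PySem.Str.splitMax? line ":" 1).getD [] with
    | k :: v :: _ => (st.1, st.2.insert (PySem.Str.strip k) (PySem.Str.strip v))
    | _ => st
  else st

def parse_job_listings (result : String) : List (List (String × String)) :=
  let st := ((PySem.Str.split? result "\n").getD []).foldl paStep ([], PySem.Dict.empty)
  (if st.2.items.isEmpty then st.1 else st.1 ++ [st.2]).map PySem.Dict.items

-- ===== PORT B =====
-- the comprehension's element: a ':' line yields its (stripped key, stripped value) pair
def pbPair? (line : String) : Option (String × String) :=
  if PySem.Str.isIn ":" line then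
    match (PySem.Str.splitMax? line ":" 1).getD [] with
    | k :: v :: _ => some (PySem.Str.strip k, PySem.Str.strip v)
    | _ => none
  else none

-- _block: dict comprehension over the ':' lines of a slice
def pbBlock (seg : List String) : PySem.Dict String String :=
  (seg.filterMap pbPair?).foldl (fun d kv => d.insert kv.1 kv.2) PySem.Dict.empty

-- the outer while-loop: count forward to the next header, parse the slice, skip the header
def pbGo (jobs : List (List (String × String))) (lines : List String) :
    List (List (String × String)) :=
  let body := lines.takeWhile (fun l => !(PySem.Str.startswith l "Job"))
  let d := pbBlock body
  let jobs' := if d.items.isEmpty then jobs else jobs ++ [d.items]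
  if h : body.length < lines.length then pbGo jobs' (lines.drop (body.length + 1))
  else jobs'
termination_by lines.length
decreasing_by simp only [List.length_drop]; omega

def parse_job_listings_alt (result : String) : List (List (String × String)) :=
  pbGo [] (((PySem.Str.split? result "\n").getD []).map PySem.Str.strip)

-- ===== PRECONDITION & SPEC =====
def Spec_parse_job_listings (result : String) (out : List (List (String × String))) : Prop := out = parse_job_listings_alt result
instance (result : String) (out : List (List (String × String))) : Decidable (Spec_parse_job_listings result out) := by unfold Spec_parse_job_listings; infer_instance

-- ===== CLAIM =====
def Claim_equal_parse_job_listings : Prop := ∀ (result : String), Dom_parse_job_listings result → Spec_parse_job_listings result (parse_job_listings result)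

-- ===== LEMMAS AND PROOFS =====

-- finalize A's loop state into the returned value
def paFin (st : List (PySem.Dict String String) × PySem.Dict String String) : List (List (String × String)) :=
  (if st.2.items.isEmpty then st.1 else st.1 ++ [st.2]).map PySem.Dict.items

-- emit one dict's items iff non-empty
def emitD (d : PySem.Dict String String) : List (List (String × String)) :=
  if d.items.isEmpty then [] else [d.items]

-- proof-only recursive model: B's run, line by line, carrying the open block's dict
def pbGoD (d : PySem.Dict String String) : List String → List (List (String × String))
  | [] => emitD d
  | l :: ls =>
    if PySem.Str.startswith l "Job" then emitD d ++ pbGoD PySem.Dict.empty ls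
    else pbGoD (match pbPair? l with
                | some kv => d.insert kv.1 kv.2
                | none => d) ls

theorem paStep_eq (js : List (PySem.Dict String String)) (d : PySem.Dict String String) (l : String) :
    paStep (js, d) l = (js ++ (paStep ([], d) l).1, (paStep ([], d) l).2) := by
  unfold paStep
  dsimp only
  split_ifs with h1 h2 h3
  · simp
  · simp
  · rcases (PySem.Str.splitMax? (PySem.Str.strip l) ":" 1).getD [] with _ | ⟨k, _ | ⟨v, r⟩⟩ <;> simp
  · simp

-- A's fold only appends to the flushed list: the initial list is a prefix
theorem paFold_prefix (ls : List String) : ∀ (st : List (PySem.Dict String String) × PySem.Dict String String),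
    ls.foldl paStep st = (st.1 ++ (ls.foldl paStep ([], st.2)).1, (ls.foldl paStep ([], st.2)).2) := by
  induction ls with
  | nil => intro st; simp
  | cons l ls ih =>
    rintro ⟨js, d⟩
    simp only [List.foldl_cons]
    rw [ih (paStep (js, d) l), ih (paStep ([], d) l), paStep_eq js d l]
    simp [List.append_assoc]

-- pulling a flushed prefix out of A's finalizer
theorem paFin_append (F : List (PySem.Dict String String)) (st : List (PySem.Dict String String) × PySem.Dict String String) :
    paFin (F ++ st.1, st.2) = F.map PySem.Dict.items ++ paFin st := by
  unfold paFin
  split <;> simp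

-- A's run from state ([], d) is the line-by-line model pbGoD d on the stripped lines
theorem paRun_eq_goD (raws : List String) : ∀ (d : PySem.Dict String String),
    paFin (raws.foldl paStep ([], d)) = pbGoD d (raws.map PySem.Str.strip) := by
  induction raws with
  | nil =>
    intro d
    simp only [List.foldl_nil, List.map_nil, pbGoD]
    unfold paFin emitD
    split <;> simp
  | cons raw raws ih =>
    intro d
    simp only [List.foldl_cons, List.map_cons, pbGoD]
    by_cases h1 : PySem.Str.startswith (PySem.Str.strip raw) "Job"
    · have hA : paStep ([], d) raw =
          ((if d.items.isEmpty then [] else [d]), PySem.Dict.empty) := by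
        unfold paStep; dsimp only; rw [if_pos h1]; split_ifs <;> simp
      rw [if_pos h1, hA, paFold_prefix, paFin_append, ih]
      unfold emitD
      split <;> simp
    · have hA : paStep ([], d) raw =
          ([], (match pbPair? (PySem.Str.strip raw) with
                | some kv => d.insert kv.1 kv.2
                | none => d)) := by
        unfold paStep pbPair?
        dsimp only
        rw [if_neg h1]
        split_ifs
        · rcases (PySem.Str.splitMax? (PySem.Str.strip raw) ":" 1).getD [] with _ | ⟨k, _ | ⟨v, r⟩⟩ <;> rfl
        · rfl
      rw [if_neg h1, hA, ih]

-- B's accumulator only grows: the initial jobs list is a prefix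
theorem pbGo_nil (jobs : List (List (String × String))) : pbGo jobs [] = jobs := by
  rw [pbGo]
  simp [pbBlock, PySem.Dict.empty]

theorem pbGo_acc (n : Nat) : ∀ (ls : List String), ls.length ≤ n → ∀ (jobs : List (List (String × String))),
    pbGo jobs ls = jobs ++ pbGo [] ls := by
  induction n with
  | zero =>
    intro ls hlen jobs
    have hnil : ls = [] := List.eq_nil_of_length_eq_zero (Nat.le_zero.mp hlen)
    subst hnil
    rw [pbGo_nil, pbGo_nil, List.append_nil]
  | succ n ih =>
    intro ls hlen jobs
    conv_lhs => rw [pbGo]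
    conv_rhs => rw [pbGo]
    by_cases h : (ls.takeWhile (fun l => !(PySem.Str.startswith l "Job"))).length < ls.length
    · rw [dif_pos h, dif_pos h]
      have hd : (ls.drop ((ls.takeWhile (fun l => !(PySem.Str.startswith l "Job"))).length + 1)).length ≤ n := by
        simp only [List.length_drop]; omega
      conv_rhs => rw [ih _ hd]
      conv_lhs => rw [ih _ hd]
      split <;> simp
    · rw [dif_neg h, dif_neg h]
      split <;> simp

-- the line-by-line model unfolds to one takeWhile block plus the rest
theorem pbGoD_block (ls : List String) : ∀ (d : PySem.Dict String String),
    pbGoD d ls =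
      emitD ((ls.takeWhile (fun l => !(PySem.Str.startswith l "Job"))).foldl
               (fun d l => match pbPair? l with
                           | some kv => d.insert kv.1 kv.2
                           | none => d) d) ++
      (if (ls.takeWhile (fun l => !(PySem.Str.startswith l "Job"))).length < ls.length then
         pbGoD PySem.Dict.empty (ls.drop ((ls.takeWhile (fun l => !(PySem.Str.startswith l "Job"))).length + 1))
       else []) := by
  induction ls with
  | nil => intro d; simp [pbGoD]
  | cons l ls ih =>
    intro d
    by_cases h1 : PySem.Str.startswith l "Job" = true
    · have h1' : PySem.Chars.startswith l.toList ['J', 'o', 'b'] = true := by simpa using h1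
      have ht : (l :: ls).takeWhile (fun l => !(PySem.Str.startswith l "Job")) = [] := by
        simp [h1']
      rw [ht]
      simp only [pbGoD, if_pos h1, List.foldl_nil, List.length_nil, List.length_cons,
        List.drop_succ_cons, List.drop_zero]
      rw [if_pos (Nat.succ_pos ls.length)]
    · have h1' : PySem.Chars.startswith l.toList ['J', 'o', 'b'] = false := by
        simpa using Bool.eq_false_iff.mpr (fun hc => h1 (by simpa using hc))
      have ht : (l :: ls).takeWhile (fun l => !(PySem.Str.startswith l "Job")) =
          l :: ls.takeWhile (fun l => !(PySem.Str.startswith l "Job")) := by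
        simp [h1']
      rw [ht]
      simp only [pbGoD, if_neg h1, List.length_cons, List.foldl_cons, List.drop_succ_cons,
        Nat.add_lt_add_iff_right]
      rw [ih]

-- a dict comprehension over the pairs equals folding the optional pair of each line
theorem pbBlock_eq_fold (seg : List String) : ∀ (d : PySem.Dict String String),
    (seg.filterMap pbPair?).foldl (fun d kv => d.insert kv.1 kv.2) d =
      seg.foldl (fun d l => match pbPair? l with
                            | some kv => d.insert kv.1 kv.2
                            | none => d) d := by
  induction seg with
  | nil => intro d; simp
  | cons l ls ih =>
    intro d
    rcases hp : pbPair? l with _ | kv <;> simp [hp, ih]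

-- the model from the empty dict is B's loop
theorem goD_eq_go (n : Nat) : ∀ (ls : List String), ls.length ≤ n →
    pbGoD PySem.Dict.empty ls = pbGo [] ls := by
  induction n with
  | zero =>
    intro ls hlen
    have hnil : ls = [] := List.eq_nil_of_length_eq_zero (Nat.le_zero.mp hlen)
    subst hnil
    rw [pbGo_nil]
    simp [pbGoD, emitD, PySem.Dict.empty]
  | succ n ih =>
    intro ls hlen
    rw [pbGoD_block, pbGo]
    unfold pbBlock
    rw [pbBlock_eq_fold]
    by_cases h : (ls.takeWhile (fun l => !(PySem.Str.startswith l "Job"))).length < ls.length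
    · rw [if_pos h, dif_pos h]
      have hd : (ls.drop ((ls.takeWhile (fun l => !(PySem.Str.startswith l "Job"))).length + 1)).length ≤ n := by
        simp only [List.length_drop]; omega
      rw [pbGo_acc n _ hd, ih _ hd]
      unfold emitD
      split <;> simp
    · rw [if_neg h, dif_neg h]
      unfold emitD
      split <;> simp

-- ===== VERDICT =====
theorem parse_job_listings_spec : Claim_equal_parse_job_listings := by
  intro result _
  show parse_job_listings result = parse_job_listings_alt result
  unfold parse_job_listings parse_job_listings_alt
  dsimp only
  have h := paRun_eq_goD ((PySem.Str.split? result "\n").getD []) PySem.Dict.empty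
  unfold paFin at h
  rw [h, goD_eq_go (((PySem.Str.split? result "\n").getD []).map PySem.Str.strip).length _ le_rfl]
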